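-- pv_equiv track=rewrite | github.com/manikya7022/HyperbolicBO---Ultrametric-Bayesian-Optimization | src/hyperbolicbo/benchmarks/__init__.py | arch_str_to_ops
-- ===== SOURCE A (Python) =====
-- from typing import Dict, List, Any, Optional, Tuple
--
-- def arch_str_to_ops(arch_str: str) -> List[str]:
--     """Parse NAS-Bench-201 architecture string to operation list.
--
--     Format: |op~0|+|op~0|op~1|+|op~0|op~1|op~2|
--     """
--     ops = []
--     for part in arch_str.split('+'):
--         for op_part in part.split('|'):
--             if '~' in op_part:
--                 op = op_part.split('~')[0]
--                 ops.append(op)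
--     return ops
-- ===== SOURCE B (Python) =====
-- def arch_str_to_ops(arch_str):
--     """Single left-to-right character scan: '|' and '+' delimit tokens; a token
--     that contains '~' contributes the prefix before its first '~'."""
--     ops = []
--     buf = []
--     seen = False
--     for ch in arch_str:
--         if ch == '|' or ch == '+':
--             if seen:
--                 ops.append(''.join(buf))
--             buf = []
--             seen = False
--         elif ch == '~':
--             seen = True
--         elif not seen:
--             buf.append(ch)
--     if seen:
--         ops.append(''.join(buf))
--     return ops
-- ===== Notes on version B (the rewrite author's own statement) =====
-- stated objective: alternative
-- what changed: Replaced the nested delimiter-split loops and per-token prefix lookup by a single left-to-right character scan with a buffer and a seen-flag, so no intermediate token lists are built.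
import Mathlib
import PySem

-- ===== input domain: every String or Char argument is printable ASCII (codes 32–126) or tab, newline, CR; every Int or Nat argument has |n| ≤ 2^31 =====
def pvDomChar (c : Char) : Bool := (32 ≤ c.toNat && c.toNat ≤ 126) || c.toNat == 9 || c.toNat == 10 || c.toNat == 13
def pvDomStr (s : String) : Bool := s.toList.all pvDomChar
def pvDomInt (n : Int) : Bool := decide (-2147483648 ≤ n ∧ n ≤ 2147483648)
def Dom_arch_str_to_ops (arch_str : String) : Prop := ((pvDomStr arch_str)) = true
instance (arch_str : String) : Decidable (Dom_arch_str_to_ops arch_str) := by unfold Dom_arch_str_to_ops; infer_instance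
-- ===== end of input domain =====

-- B replaces A's nested split('+')/split('|') loops by a single character scan
-- with an explicit buffer — an alternative one-pass algorithm, same cost.


-- ===== PORT A =====
-- A: for part in arch_str.split('+'): for op_part in part.split('|'):
--      if '~' in op_part: ops.append(op_part.split('~')[0])
def arch_str_to_ops (arch_str : String) : List String :=
  (PySem.Chars.splitOn arch_str.toList ['+']).foldl (fun ops part =>
    (PySem.Chars.splitOn part ['|']).foldl (fun ops op_part =>
      if PySem.Chars.isIn ['~'] op_part then
        ops ++ [String.mk ((PySem.Chars.splitOn op_part ['~']).headD [])]
      else ops) ops) ([] : List String)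

-- ===== PORT B =====
-- B: one scan; state = (ops, buf, seen); delimiters '|' '+' flush, '~' sets seen,
-- other chars extend buf while no '~' has been seen in the current token.
def arch_str_to_ops_alt (arch_str : String) : List String :=
  let fin := arch_str.toList.foldl (fun st c =>
    if c = '|' ∨ c = '+' then
      ((if st.2.2 then st.1 ++ [String.mk st.2.1] else st.1), ([] : List Char), false)
    else if c = '~' then (st.1, st.2.1, true)
    else if st.2.2 then st
    else (st.1, st.2.1 ++ [c], false)) (([] : List String), ([] : List Char), false)
  if fin.2.2 then fin.1 ++ [String.mk fin.2.1] else fin.1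

-- ===== PRECONDITION & SPEC =====
def Spec_arch_str_to_ops (arch_str : String) (out : List String) : Prop := out = arch_str_to_ops_alt arch_str
instance (arch_str : String) (out : List String) : Decidable (Spec_arch_str_to_ops arch_str out) := by unfold Spec_arch_str_to_ops; infer_instance

-- ===== CLAIM (what is proved, stated in full; the proofs are below) =====
def Claim_equal_arch_str_to_ops : Prop := ∀ (arch_str : String), Dom_arch_str_to_ops arch_str → Spec_arch_str_to_ops arch_str (arch_str_to_ops arch_str)

-- ===== LEMMAS AND PROOFS =====

-- Reference splitter: sp p l = (first token, remaining tokens) of splitting l at chars with p.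
def sp (p : Char → Bool) : List Char → List Char × List (List Char)
  | [] => ([], [])
  | c :: l =>
    let r := sp p l
    if p c then ([], r.1 :: r.2) else (c :: r.1, r.2)

theorem sp_cons_true (p : Char → Bool) (c : Char) (l : List Char) (h : p c = true) :
    sp p (c :: l) = ([], (sp p l).1 :: (sp p l).2) := by
  simp [sp, h]

theorem sp_cons_false (p : Char → Bool) (c : Char) (l : List Char) (h : p c = false) :
    sp p (c :: l) = (c :: (sp p l).1, (sp p l).2) := by
  simp [sp, h]

theorem splitOn_go_eq (d : Char) :
    ∀ (fuel : Nat) (l cur : List Char) (acc : List (List Char)), l.length ≤ fuel →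
      PySem.Chars.splitOn.go [d] fuel l cur acc =
        acc.reverse ++ (cur.reverse ++ (sp (fun c => c == d) l).1) :: (sp (fun c => c == d) l).2 := by
  intro fuel
  induction fuel with
  | zero =>
    intro l cur acc h
    have hl : l = [] := List.eq_nil_of_length_eq_zero (Nat.le_zero.mp h)
    subst hl
    simp [PySem.Chars.splitOn.go, sp]
  | succ f ih =>
    intro l cur acc h
    cases l with
    | nil => simp [PySem.Chars.splitOn.go, sp]
    | cons c rest =>
      have hrest : rest.length ≤ f := by simpa using h
      by_cases hc : c = d
      · subst hc
        have hpre : List.isPrefixOf [c] (c :: rest) = true := by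
          simp [List.isPrefixOf]
        simp only [PySem.Chars.splitOn.go, hpre, if_pos]
        rw [ih _ _ _ (by simpa using hrest)]
        simp [sp]
      · have hpre : List.isPrefixOf [d] (c :: rest) = false := by
          simp [List.isPrefixOf]
          exact fun h' => (hc h'.symm).elim
        simp only [PySem.Chars.splitOn.go, hpre, Bool.false_eq_true, if_false]
        rw [ih _ _ _ hrest]
        simp [sp, hc]

theorem splitOn_eq_sp (d : Char) (l : List Char) :
    PySem.Chars.splitOn l [d] = (sp (fun c => c == d) l).1 :: (sp (fun c => c == d) l).2 := by
  have := splitOn_go_eq d (l.length + 1) l [] [] (Nat.le_succ _)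
  simpa [PySem.Chars.splitOn] using this

theorem isIn_singleton (a : Char) (l : List Char) :
    PySem.Chars.isIn [a] l = true ↔ a ∈ l := by
  rw [PySem.Chars.isIn_iff_infix]
  constructor
  · exact fun h => h.subset (by simp)
  · intro h
    obtain ⟨s, t, rfl⟩ := List.append_of_mem h
    exact ⟨s, t, by simp⟩

-- the per-token emission A performs
def emit (t : List Char) : Option String :=
  if PySem.Chars.isIn ['~'] t then
    some (String.mk ((PySem.Chars.splitOn t ['~']).headD []))
  else none

theorem emit_eq (t : List Char) :
    emit t = if '~' ∈ t then some (String.mk ((sp (fun c => c == '~') t).1)) else none := by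
  by_cases h : '~' ∈ t
  · simp [emit, (isIn_singleton _ _).mpr h, h, splitOn_eq_sp]
  · have : PySem.Chars.isIn ['~'] t = false := by
      cases hb : PySem.Chars.isIn ['~'] t
      · rfl
      · exact absurd ((isIn_singleton _ _).mp hb) h
    simp [emit, this, h]

-- A's inner fold appends a filterMap
theorem inner_fold_eq (ts : List (List Char)) (ops : List String) :
    ts.foldl (fun ops op_part =>
      if PySem.Chars.isIn ['~'] op_part then
        ops ++ [String.mk ((PySem.Chars.splitOn op_part ['~']).headD [])]
      else ops) ops = ops ++ ts.filterMap emit := by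
  induction ts generalizing ops with
  | nil => simp
  | cons t ts ih =>
    simp only [List.foldl_cons]
    rw [ih]
    cases h : PySem.Chars.isIn ['~'] t
    · simp [emit, h, List.filterMap_cons]
    · simp [emit, h, List.filterMap_cons]

-- A's outer fold flattens
theorem outer_fold_eq (parts : List (List Char)) (ops : List String) :
    parts.foldl (fun ops part =>
      (PySem.Chars.splitOn part ['|']).foldl (fun ops op_part =>
        if PySem.Chars.isIn ['~'] op_part then
          ops ++ [String.mk ((PySem.Chars.splitOn op_part ['~']).headD [])]
        else ops) ops) ops
    = ops ++ parts.flatMap (fun part => (PySem.Chars.splitOn part ['|']).filterMap emit) := by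
  induction parts generalizing ops with
  | nil => simp
  | cons p ps ih =>
    simp only [List.foldl_cons]
    rw [inner_fold_eq, ih]
    simp [List.flatMap_cons]

-- splitting on '+' then on '|' = splitting on either delimiter
theorem sp_flat (l : List Char) :
    (sp (fun c => c == '|') (sp (fun c => c == '+') l).1).1
      = (sp (fun c => c == '|' || c == '+') l).1 ∧
    (sp (fun c => c == '|') (sp (fun c => c == '+') l).1).2
        ++ ((sp (fun c => c == '+') l).2).flatMap
            (fun t => (sp (fun c => c == '|') t).1 :: (sp (fun c => c == '|') t).2)
      = (sp (fun c => c == '|' || c == '+') l).2 := by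
  induction l with
  | nil => simp [sp]
  | cons c l ih =>
    by_cases hp : c = '+'
    · subst hp
      rw [sp_cons_true _ _ _ (by simp), sp_cons_true _ _ _ (by simp)]
      refine ⟨rfl, ?_⟩
      simp only [List.flatMap_cons, sp, List.nil_append, List.cons_append]
      rw [ih.1, ih.2]
    · by_cases hb : c = '|'
      · subst hb
        rw [sp_cons_false _ _ _ (by simp), sp_cons_true _ _ _ (by simp),
            sp_cons_true _ _ _ (by simp)]
        exact ⟨rfl, by rw [List.cons_append, ih.1, ih.2]⟩
      · rw [sp_cons_false _ _ _ (by simp [hp]), sp_cons_false _ _ _ (by simp [hb]),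
            sp_cons_false _ _ _ (by simp [hb, hp])]
        exact ⟨by rw [ih.1], ih.2⟩

-- B-side: the scan's step and finish, and what the tail contributes given the state
def bStep (st : List String × List Char × Bool) (c : Char) : List String × List Char × Bool :=
  if c = '|' ∨ c = '+' then
    ((if st.2.2 then st.1 ++ [String.mk st.2.1] else st.1), ([] : List Char), false)
  else if c = '~' then (st.1, st.2.1, true)
  else if st.2.2 then st
  else (st.1, st.2.1 ++ [c], false)

def bFinish (st : List String × List Char × Bool) : List String :=
  if st.2.2 then st.1 ++ [String.mk st.2.1] else st.1

def gTok (buf : List Char) (seen : Bool) (t : List Char) : List String :=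
  if seen then [String.mk buf]
  else if '~' ∈ t then [String.mk (buf ++ (sp (fun c => c == '~') t).1)]
  else []

theorem scan_eq (l : List Char) :
    ∀ (ops : List String) (buf : List Char) (seen : Bool),
      bFinish (l.foldl bStep (ops, buf, seen)) =
        ops ++ gTok buf seen ((sp (fun c => c == '|' || c == '+') l).1)
            ++ ((sp (fun c => c == '|' || c == '+') l).2).filterMap emit := by
  induction l with
  | nil =>
    intro ops buf seen
    cases seen <;> simp [bFinish, gTok, sp]
  | cons c l ih =>
    intro ops buf seen
    simp only [List.foldl_cons]
    by_cases hd : c = '|' ∨ c = '+'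
    · have hstep : bStep (ops, buf, seen) c =
          ((if seen then ops ++ [String.mk buf] else ops), [], false) := by
        simp [bStep, hd]
      rw [hstep, ih, sp_cons_true _ _ _ (by rcases hd with h | h <;> simp [h])]
      cases seen <;>
        cases hct : decide ('~' ∈ (sp (fun c => c == '|' || c == '+') l).1) <;>
          simp_all [gTok, emit_eq, List.filterMap_cons]
    · rw [not_or] at hd
      rw [sp_cons_false _ _ _ (by simp [hd.1, hd.2])]
      by_cases ht : c = '~'
      · have hstep : bStep (ops, buf, seen) c = (ops, buf, true) := by
          simp [bStep, hd.1, hd.2, ht]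
        rw [hstep, ih]
        subst ht
        cases seen <;> simp [gTok, sp]
      · cases seen with
        | true =>
          have hstep : bStep (ops, buf, true) c = (ops, buf, true) := by
            simp [bStep, hd.1, hd.2, ht]
          rw [hstep, ih]
          simp [gTok]
        | false =>
          have hstep : bStep (ops, buf, false) c = (ops, buf ++ [c], false) := by
            simp [bStep, hd.1, hd.2, ht]
          rw [hstep, ih]
          have htc : ¬ '~' = c := fun h => ht h.symm
          have hsp1 := sp_cons_false (fun x => x == '~') c
            ((sp (fun c => c == '|' || c == '+') l).1) (by simp [ht])
          simp [gTok, hsp1, htc, List.append_assoc]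

-- ===== VERDICT (by name: the statement is the Claim_ definition above) =====
theorem arch_str_to_ops_spec : Claim_equal_arch_str_to_ops := by
  intro s _
  unfold Spec_arch_str_to_ops
  have halt : arch_str_to_ops_alt s = bFinish (s.toList.foldl bStep ([], [], false)) := rfl
  rw [halt, scan_eq]
  unfold arch_str_to_ops
  rw [splitOn_eq_sp, outer_fold_eq]
  simp only [List.nil_append]
  have hcons : ((sp (fun c => c == '+') s.toList).1 :: (sp (fun c => c == '+') s.toList).2).flatMap
      (fun t => (sp (fun c => c == '|') t).1 :: (sp (fun c => c == '|') t).2)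
      = (sp (fun c => c == '|' || c == '+') s.toList).1
          :: (sp (fun c => c == '|' || c == '+') s.toList).2 := by
    simp only [List.flatMap_cons, List.cons_append]
    rw [(sp_flat s.toList).1, (sp_flat s.toList).2]
  have hA : ∀ ps : List (List Char),
      ps.flatMap (fun part => (PySem.Chars.splitOn part ['|']).filterMap emit)
        = (ps.flatMap (fun t => (sp (fun c => c == '|') t).1 :: (sp (fun c => c == '|') t).2)).filterMap emit := by
    intro ps
    rw [List.filterMap_flatMap]
    simp only [splitOn_eq_sp]
  rw [hA, hcons]
  cases hct : decide ('~' ∈ (sp (fun c => c == '|' || c == '+') s.toList).1) <;>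
    simp_all [gTok, emit_eq, List.filterMap_cons]
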